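-- pv_equiv track=rewrite | github.com/yoonseopkim/baekjoonPractice | 프로그래머스/2/72411. 메뉴 리뉴얼/메뉴 리뉴얼.py | solution
-- ===== SOURCE A (Python) =====
-- from itertools import combinations
-- from collections import Counter
--
-- def solution(orders, course):
--     #문제분석
--     #코스요리 == 2가지 이상 단품메뉴
--     #최소 2명 이상의 손님에게 주문된 단품요리
--     #코스요리 개수가 나오면 메뉴구성이 문자열로 리스트에 담김
--     #2*10*10*10=2000 시간복잡도는 고려 x
--     #오름차순정렬
--     #알고리즘
--
--     #엣지케이스
--     #단품요리가 주문된 횟수가 같을경우->모두 배열에 담기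
--     answer = []
--
--     for course_length in course:
--         tmp = []
--
--         #횟수를 하나씩 세는 카운터가 있으면 좋을듯
--         for order in orders:
--             sorted_order = sorted(order)
--
--             if len(sorted_order) >= course_length:
--
--                 combs = list(combinations(sorted_order,course_length))
--
--                 for comb in combs:
--                     tmp.append(''.join(comb))
--
--         comb_counts = Counter(tmp)
--
--         if comb_counts:
--             max_count = max(comb_counts.values())
--
--             if max_count > 1:
--                 for combo, count in comb_counts.items():
--                     if count == max_count:
--                         answer.append(combo)
--
--
--
--     return sorted(answer)
-- ===== SOURCE B (Python) =====
-- from itertools import combinations, groupby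
--
-- def solution(orders, course):
--     # Sort each order once up front; for each requested length collect its combos,
--     # then count by sort + run scan (groupby) instead of hashing into a Counter.
--     sorted_orders = [''.join(sorted(order)) for order in orders]
--     answer = []
--     for length in course:
--         combos = []
--         for s in sorted_orders:
--             if length <= len(s):
--                 combos.extend(''.join(c) for c in combinations(s, length))
--         combos.sort()
--         best, winners = 1, []
--         for key, group in groupby(combos):
--             run = sum(1 for _ in group)
--             if run > best:
--                 best, winners = run, [key]
--             elif run == best and run > 1:
--                 winners.append(key)
--         answer.extend(winners)
--     return sorted(answer)
-- ===== Notes on version B (the rewrite author's own statement) =====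
-- stated objective: alternative
-- what changed: B sorts each order once up front and, per requested length, counts the combination multiset by sorting it and scanning runs in one streaming pass (tracking the best run and its tied keys), instead of A's re-sorting every order per course entry and hash-counting into a Counter followed by separate max and filter passes.
-- outside the precondition, e.g. on solution(['ab'], [-1]): A raises ValueError, B raises ValueError
import Mathlib
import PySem

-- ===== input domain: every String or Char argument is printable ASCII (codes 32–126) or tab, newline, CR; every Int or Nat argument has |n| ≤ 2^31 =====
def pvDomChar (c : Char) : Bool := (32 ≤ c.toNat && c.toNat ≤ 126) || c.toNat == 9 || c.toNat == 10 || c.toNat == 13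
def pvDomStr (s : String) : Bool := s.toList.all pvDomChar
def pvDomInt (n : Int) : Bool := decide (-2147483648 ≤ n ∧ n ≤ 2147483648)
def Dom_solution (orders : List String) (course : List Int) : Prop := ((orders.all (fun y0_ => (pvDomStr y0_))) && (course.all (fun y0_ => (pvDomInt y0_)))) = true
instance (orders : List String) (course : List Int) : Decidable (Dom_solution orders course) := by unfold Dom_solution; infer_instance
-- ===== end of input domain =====

-- B sorts each order once up front and counts each length's combinations by sorting the
-- combination list and scanning its runs (groupby) instead of A's per-entry re-sorting and
-- Counter hashing; same return value as A.

-- ===== PORT A =====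
def solution (orders : List String) (course : List Int) : List String :=
  let answer := course.foldl (fun answer course_length =>
    let tmp := orders.foldl (fun tmp order =>
      let sorted_order := PySem.List.sorted order.toList (fun c => c) false
      if course_length ≤ (sorted_order.length : Int) then
        tmp ++ (PySem.List.combinations sorted_order course_length.toNat).map (fun comb => String.ofList comb)
      else tmp) []
    let comb_counts := PySem.Dict.counter tmp
    if comb_counts.items.isEmpty then answer
    else
      match PySem.List.max? comb_counts.values (fun v => v) with
      | none => answer
      | some max_count =>
        if max_count > 1 then
          comb_counts.items.foldl (fun answer p =>
            if p.2 == max_count then answer ++ [p.1] else answer) answer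
        else answer) []
  PySem.List.sorted answer (fun x => x) false

-- ===== PORT B =====
-- the groupby loop of B: scan runs of an (already sorted) list, tracking the best run and its keys
def runScan : List String → Int → List String → Int × List String
  | [], best, winners => (best, winners)
  | x :: rest, best, winners =>
    let g := rest.takeWhile (fun y => y == x)
    let rest' := rest.dropWhile (fun y => y == x)
    let run : Int := 1 + (g.length : Int)
    if best < run then runScan rest' run [x]
    else if run == best && 1 < run then runScan rest' best (winners ++ [x])
    else runScan rest' best winners
  termination_by l => l.length
  decreasing_by all_goals exact Nat.lt_succ_of_le (List.length_dropWhile_le _ _)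

def solution_alt (orders : List String) (course : List Int) : List String :=
  let sorted_orders := orders.map (fun order => String.ofList (PySem.List.sorted order.toList (fun c => c) false))
  let answer := course.foldl (fun answer length =>
    let combos := sorted_orders.foldl (fun combos s =>
      if length ≤ (s.toList.length : Int) then
        combos ++ (PySem.List.combinations s.toList length.toNat).map (fun c => String.ofList c)
      else combos) []
    let combos := PySem.List.sorted combos (fun x => x) false
    answer ++ (runScan combos 1 []).2) []
  PySem.List.sorted answer (fun x => x) false

-- ===== PRECONDITION & SPEC =====
-- Pre_ excludes a negative course length combined with a non-empty orders list: there both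
-- Pythons raise ValueError in combinations() (with orders == [] no combination is ever taken).
def Pre_solution (orders : List String) (course : List Int) : Prop :=
  orders ≠ [] → ∀ L ∈ course, 0 ≤ L
instance (orders : List String) (course : List Int) : Decidable (Pre_solution orders course) := by
  unfold Pre_solution; infer_instance

def pvWitness_solution : List String × List Int := (["bca", "ab"], [2])

def Spec_solution (orders : List String) (course : List Int) (out : List String) : Prop := out = solution_alt orders course
instance (orders : List String) (course : List Int) (out : List String) : Decidable (Spec_solution orders course out) := by unfold Spec_solution; infer_instance

-- ===== CLAIM (what is proved, stated in full; the proofs are below) =====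
def Claim_equal_solution : Prop := ∀ (orders : List String) (course : List Int), Dom_solution orders course → Pre_solution orders course → Spec_solution orders course (solution orders course)

-- ===== LEMMAS AND PROOFS =====

-- A's inner fold over orders (the per-length combination list, shared by both proofs)
def tmpF (orders : List String) (L : Int) : List String :=
  orders.foldl (fun tmp order =>
    let sorted_order := PySem.List.sorted order.toList (fun c => c) false
    if L ≤ (sorted_order.length : Int) then
      tmp ++ (PySem.List.combinations sorted_order L.toNat).map (fun comb => String.ofList comb)
    else tmp) []

-- A's per-length contribution to answer
def blkA (t : List String) : List String :=
  if (PySem.Dict.counter t).items.isEmpty then []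
  else match PySem.List.max? (PySem.Dict.counter t).values (fun v => v) with
  | none => []
  | some m =>
    if m > 1 then ((PySem.Dict.counter t).items.filter (fun p => p.2 == m)).map (fun p => p.1)
    else []

theorem bodyA_eq (t a : List String) :
    (if (PySem.Dict.counter t).items.isEmpty then a
     else match PySem.List.max? (PySem.Dict.counter t).values (fun v => v) with
     | none => a
     | some max_count =>
       if max_count > 1 then
         (PySem.Dict.counter t).items.foldl (fun answer p =>
           if p.2 == max_count then answer ++ [p.1] else answer) a
       else a)
    = a ++ blkA t := by
  unfold blkA
  split
  · simp
  · cases PySem.List.max? (PySem.Dict.counter t).values (fun v => v) with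
    | none => simp
    | some m =>
      simp only
      split
      · rw [PySem.List.foldl_append_if]
      · simp

theorem run_facts (x : String) (rest : List String)
    (hp : (x :: rest).Pairwise (· ≤ ·)) :
    (rest.dropWhile (fun y => y == x)).Pairwise (· ≤ ·) ∧
    (∀ z ∈ rest.dropWhile (fun y => y == x), x < z) ∧
    ((x :: rest).count x = 1 + (rest.takeWhile (fun y => y == x)).length) ∧
    (∀ z ∈ rest.dropWhile (fun y => y == x), (x :: rest).count z = (rest.dropWhile (fun y => y == x)).count z) ∧
    (∀ z, z ∈ x :: rest ↔ z = x ∨ z ∈ rest.dropWhile (fun y => y == x)) := by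
  set g := rest.takeWhile (fun y => y == x) with hgdef
  set rest' := rest.dropWhile (fun y => y == x) with hrdef
  have hsplit : g ++ rest' = rest := List.takeWhile_append_dropWhile
  have hx_le : ∀ z ∈ rest, x ≤ z := fun z hz => List.rel_of_pairwise_cons hp hz
  have hg : ∀ y ∈ g, y = x := by
    intro y hy
    exact eq_of_beq (List.mem_takeWhile_imp (p := fun y => y == x) (l := rest) hy)
  have hp' : rest'.Pairwise (· ≤ ·) :=
    List.Pairwise.sublist (List.dropWhile_sublist _) (List.Pairwise.of_cons hp)
  have hsub : ∀ z ∈ rest', z ∈ rest := fun z hz => (List.dropWhile_sublist _).subset hz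
  have hxlt : ∀ z ∈ rest', x < z := by
    intro z hz
    rcases hre : rest' with _ | ⟨h', t'⟩
    · rw [hre] at hz; cases hz
    · have hh' : ¬ (h' == x) = true := by
        have := List.head?_dropWhile_not (fun y => y == x) rest
        rw [← hrdef, hre] at this
        simpa using this
      have hh'x : x < h' := by
        have hmem : h' ∈ rest := hsub h' (by rw [hre]; exact List.mem_cons_self)
        exact lt_of_le_of_ne (hx_le h' hmem) (fun h => hh' (by simp [h.symm]))
      rw [hre] at hz
      rcases List.mem_cons.mp hz with rfl | hz'
      · exact hh'x
      · have hle : h' ≤ z := by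
          rw [hre] at hp'
          exact List.rel_of_pairwise_cons hp' hz'
        exact lt_of_lt_of_le hh'x hle
  have hnx : x ∉ rest' := fun h => lt_irrefl x (hxlt x h)
  refine ⟨hp', hxlt, ?_, ?_, ?_⟩
  · rw [List.count_cons_self, ← hsplit, List.count_append]
    have h1 : g.count x = g.length := List.count_eq_length.mpr (fun b hb => ((hg b hb).symm ▸ rfl))
    have h2 : rest'.count x = 0 := List.count_eq_zero.mpr hnx
    omega
  · intro z hz
    have hzx : z ≠ x := fun h => hnx (h ▸ hz)
    rw [List.count_cons_of_ne (fun h => hzx h.symm), ← hsplit, List.count_append]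
    have h1 : g.count z = 0 := List.count_eq_zero.mpr (fun h => hzx (hg z h))
    omega
  · intro z
    constructor
    · intro hz
      rcases List.mem_cons.mp hz with rfl | hz'
      · exact Or.inl rfl
      · rw [← hsplit] at hz'
        rcases List.mem_append.mp hz' with h | h
        · exact Or.inl (hg z h)
        · exact Or.inr h
    · rintro (rfl | hz)
      · exact List.mem_cons_self
      · exact List.mem_cons_of_mem _ (hsub z hz)


theorem flatMap_perm {α β : Type} (l : List α) (f g : α → List β)
    (h : ∀ x ∈ l, (f x).Perm (g x)) : (l.flatMap f).Perm (l.flatMap g) := by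
  induction l with
  | nil => rfl
  | cons a l ih =>
    simp only [List.flatMap_cons]
    exact (h a List.mem_cons_self).append (ih (fun x hx => h x (List.mem_cons_of_mem _ hx)))

theorem runScan_inv (s : List String) (best : Int) (winners : List String)
    (hp : s.Pairwise (· ≤ ·)) (hb : 1 ≤ best) (hw : winners.Nodup)
    (hlt : ∀ y ∈ winners, ∀ z ∈ s, y < z) :
    (best ≤ (runScan s best winners).1) ∧
    (∀ x ∈ s, (s.count x : Int) ≤ (runScan s best winners).1) ∧
    ((runScan s best winners).1 = best ∨ ∃ x ∈ s, (s.count x : Int) = (runScan s best winners).1) ∧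
    (∀ x, x ∈ (runScan s best winners).2 ↔
      ((runScan s best winners).1 = best ∧ x ∈ winners) ∨
      (x ∈ s ∧ (s.count x : Int) = (runScan s best winners).1 ∧ 1 < (runScan s best winners).1)) ∧
    (runScan s best winners).2.Nodup := by
  fun_induction runScan s best winners with
  | case1 best winners =>
    refine ⟨le_refl _, ?_, Or.inl rfl, ?_, hw⟩
    · intro z hz; cases hz
    · intro z; simp
  | case2 x rest best winners g rest' run hrun ih =>
    obtain ⟨hp', hxlt, hcx, hcz, hmem⟩ := run_facts x rest hp
    have hgd : g = rest.takeWhile (fun y => y == x) := rfl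
    have hrd : rest' = rest.dropWhile (fun y => y == x) := rfl
    have hrundef : run = 1 + (g.length : Int) := rfl
    rw [← hrd] at hp' hxlt hcz hmem
    rw [← hgd] at hcx
    obtain ⟨i1, i2, i3, i4, i5⟩ := ih hp' (by omega) (by simp)
      (by intro y hy z hz; rcases List.mem_singleton.mp hy with rfl; exact hxlt z hz)
    set r := runScan rest' run [x]
    have hcxi : ((x :: rest).count x : Int) = run := by rw [hcx]; push_cast; ring
    refine ⟨by omega, ?_, ?_, ?_, i5⟩
    · intro z hz
      rcases (hmem z).mp hz with rfl | hz'
      · omega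
      · have := i2 z hz'; rw [hcz z hz']; exact_mod_cast this
    · rcases i3 with h | ⟨z, hz, hcnt⟩
      · exact Or.inr ⟨x, List.mem_cons_self, by omega⟩
      · exact Or.inr ⟨z, (hmem z).mpr (Or.inr hz), by rw [hcz z hz]; exact hcnt⟩
    · intro z
      rw [i4 z]
      constructor
      · rintro (⟨hr1, hzx⟩ | ⟨hz', hcnt, hgt⟩)
        · rcases List.mem_singleton.mp hzx with rfl
          exact Or.inr ⟨List.mem_cons_self, by omega, by omega⟩
        · exact Or.inr ⟨(hmem z).mpr (Or.inr hz'), by rw [hcz z hz']; exact hcnt, hgt⟩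
      · rintro (⟨hr1, hzw⟩ | ⟨hz, hcnt, hgt⟩)
        · omega
        · rcases (hmem z).mp hz with rfl | hz'
          · exact Or.inl ⟨by omega, List.mem_singleton.mpr rfl⟩
          · exact Or.inr ⟨hz', by rw [hcz z hz'] at hcnt; exact hcnt, hgt⟩
  | case3 x rest best winners g rest' run hnrun hcond ih =>
    obtain ⟨hp', hxlt, hcx, hcz, hmem⟩ := run_facts x rest hp
    have hgd : g = rest.takeWhile (fun y => y == x) := rfl
    have hrd : rest' = rest.dropWhile (fun y => y == x) := rfl
    have hrundef : run = 1 + (g.length : Int) := rfl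
    rw [← hrd] at hp' hxlt hcz hmem
    rw [← hgd] at hcx
    have hcond' : run = best ∧ 1 < run := by
      rcases Bool.and_eq_true_iff.mp hcond with ⟨h1, h2⟩
      exact ⟨by exact_mod_cast eq_of_beq h1, by exact_mod_cast of_decide_eq_true h2⟩
    have hxnw : x ∉ winners := fun h => lt_irrefl x (hlt x h x List.mem_cons_self)
    obtain ⟨i1, i2, i3, i4, i5⟩ := ih hp' hb
      (by
        simp only [List.nodup_append, hw, true_and]
        refine ⟨List.nodup_singleton x, ?_⟩
        intro a ha b hb hab
        have hbx : b = x := List.mem_singleton.mp hb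
        have hax : a < x := hlt a ha x List.mem_cons_self
        rw [hab, hbx] at hax
        exact lt_irrefl _ hax)
      (by
        intro y hy z hz
        rcases List.mem_append.mp hy with hy' | hy'
        · exact hlt y hy' z (List.mem_cons_of_mem _ ((List.dropWhile_sublist _).subset hz))
        · rcases List.mem_singleton.mp hy' with rfl; exact hxlt z hz)
    set r := runScan rest' best (winners ++ [x])
    have hcxi : ((x :: rest).count x : Int) = run := by rw [hcx]; push_cast; ring
    refine ⟨i1, ?_, ?_, ?_, i5⟩
    · intro z hz
      rcases (hmem z).mp hz with rfl | hz'
      · omega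
      · have := i2 z hz'; rw [hcz z hz']; exact_mod_cast this
    · rcases i3 with h | ⟨z, hz, hcnt⟩
      · exact Or.inl h
      · exact Or.inr ⟨z, (hmem z).mpr (Or.inr hz), by rw [hcz z hz]; exact hcnt⟩
    · intro z
      rw [i4 z]
      constructor
      · rintro (⟨hr1, hzx⟩ | ⟨hz', hcnt, hgt⟩)
        · rcases List.mem_append.mp hzx with hzw | hzw
          · exact Or.inl ⟨hr1, hzw⟩
          · rcases List.mem_singleton.mp hzw with rfl
            exact Or.inr ⟨List.mem_cons_self, by omega, by omega⟩
        · exact Or.inr ⟨(hmem z).mpr (Or.inr hz'), by rw [hcz z hz']; exact hcnt, hgt⟩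
      · rintro (⟨hr1, hzw⟩ | ⟨hz, hcnt, hgt⟩)
        · exact Or.inl ⟨hr1, List.mem_append.mpr (Or.inl hzw)⟩
        · rcases (hmem z).mp hz with rfl | hz'
          · exact Or.inl ⟨by omega, List.mem_append.mpr (Or.inr (List.mem_singleton.mpr rfl))⟩
          · exact Or.inr ⟨hz', by rw [hcz z hz'] at hcnt; exact hcnt, hgt⟩
  | case4 x rest best winners g rest' run hnrun hncond ih =>
    obtain ⟨hp', hxlt, hcx, hcz, hmem⟩ := run_facts x rest hp
    have hgd : g = rest.takeWhile (fun y => y == x) := rfl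
    have hrd : rest' = rest.dropWhile (fun y => y == x) := rfl
    have hrundef : run = 1 + (g.length : Int) := rfl
    rw [← hrd] at hp' hxlt hcz hmem
    rw [← hgd] at hcx
    have hcond' : run < best ∨ (run = best ∧ run ≤ 1) := by
      by_cases he : run = best
      · by_cases h1 : (1 : Int) < run
        · exact absurd (by rw [he] at h1 ⊢; simp [h1]) hncond
        · exact Or.inr ⟨he, by omega⟩
      · exact Or.inl (by omega)
    obtain ⟨i1, i2, i3, i4, i5⟩ := ih hp' hb hw
      (by intro y hy z hz; exact hlt y hy z (List.mem_cons_of_mem _ ((List.dropWhile_sublist _).subset hz)))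
    set r := runScan rest' best winners
    have hcxi : ((x :: rest).count x : Int) = run := by rw [hcx]; push_cast; ring
    refine ⟨i1, ?_, ?_, ?_, i5⟩
    · intro z hz
      rcases (hmem z).mp hz with rfl | hz'
      · omega
      · have := i2 z hz'; rw [hcz z hz']; exact_mod_cast this
    · rcases i3 with h | ⟨z, hz, hcnt⟩
      · exact Or.inl h
      · exact Or.inr ⟨z, (hmem z).mpr (Or.inr hz), by rw [hcz z hz]; exact hcnt⟩
    · intro z
      rw [i4 z]
      constructor
      · rintro (⟨hr1, hzw⟩ | ⟨hz', hcnt, hgt⟩)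
        · exact Or.inl ⟨hr1, hzw⟩
        · exact Or.inr ⟨(hmem z).mpr (Or.inr hz'), by rw [hcz z hz']; exact hcnt, hgt⟩
      · rintro (⟨hr1, hzw⟩ | ⟨hz, hcnt, hgt⟩)
        · exact Or.inl ⟨hr1, hzw⟩
        · rcases (hmem z).mp hz with rfl | hz'
          · omega
          · exact Or.inr ⟨hz', by rw [hcz z hz'] at hcnt; exact hcnt, hgt⟩


-- B's run scan of the sorted combination list is a permutation of A's Counter winners
theorem block_perm (t : List String) :
    ((runScan (PySem.List.sorted t (fun x => x) false) 1 []).2).Perm (blkA t) := by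
  have hperm : (PySem.List.sorted t (fun x => x) false).Perm t := PySem.List.sorted_perm t _ _
  obtain ⟨i1, i2, i3, i4, i5⟩ := runScan_inv (PySem.List.sorted t (fun x => x) false) 1 []
    (PySem.List.sorted_pairwise t _) (le_refl 1) List.nodup_nil (by intro y hy; cases hy)
  set s := PySem.List.sorted t (fun x => x) false with hs
  set r := runScan s 1 [] with hr
  by_cases ht : t = []
  · subst ht
    have hs0 : s = [] := hperm.eq_nil
    rw [hs0] at hr
    have h2 : r.2 = ([] : List String) := by rw [hr]; simp [runScan]
    have h3 : blkA [] = [] := rfl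
    rw [h2, h3]
  · obtain ⟨x0, hx0⟩ := List.exists_mem_of_ne_nil t ht
    have hitems : (PySem.Dict.counter t).items
        = (PySem.Set.ofList t).map (fun k => (k, (t.count k : Int))) :=
      PySem.Dict.items_counter t
    have hvals : (PySem.Dict.counter t).values
        = (PySem.Set.ofList t).map (fun k => (t.count k : Int)) := by
      simp [PySem.Dict.values, hitems]
    have hofne : PySem.Set.ofList t ≠ [] :=
      List.ne_nil_of_mem ((PySem.Set.mem_ofList t x0).mpr hx0)
    have hcnt : ∀ k, s.count k = t.count k := fun k => hperm.count_eq k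
    have hmems : ∀ k, k ∈ s ↔ k ∈ t := fun k => PySem.List.mem_sorted t _ _ k
    cases hmax : PySem.List.max? (PySem.Dict.counter t).values (fun v => v) with
    | none =>
      exfalso
      have := (PySem.List.max?_eq_none_iff _ _).mp hmax
      rw [hvals] at this
      exact hofne (List.map_eq_nil_iff.mp this)
    | some m =>
      have hmmax : ∀ k ∈ t, (t.count k : Int) ≤ m := by
        intro k hk
        have : ((t.count k : Int)) ∈ (PySem.Dict.counter t).values := by
          rw [hvals]
          exact List.mem_map_of_mem ((PySem.Set.mem_ofList t k).mpr hk)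
        simpa using PySem.List.max?_isMax hmax _ this
      have hm_is : ∃ k ∈ t, (t.count k : Int) = m := by
        have hmem := PySem.List.max?_mem hmax
        rw [hvals] at hmem
        obtain ⟨k, hk, hkm⟩ := List.mem_map.mp hmem
        exact ⟨k, (PySem.Set.mem_ofList t k).mp hk, hkm⟩
      have hm1 : 1 ≤ m := by
        obtain ⟨k, hk, hkm⟩ := hm_is
        have : 1 ≤ t.count k := List.one_le_count_iff.mpr hk
        omega
      have hr1 : r.1 = m := by
        obtain ⟨k, hk, hkm⟩ := hm_is
        have hks : k ∈ s := (hmems k).mpr hk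
        have h1 : m ≤ r.1 := by
          have := i2 k hks
          rw [hcnt k, hkm] at this
          exact this
        have h2 : r.1 ≤ m := by
          rcases i3 with h | ⟨z, hz, hcz⟩
          · omega
          · have := hmmax z ((hmems z).mp hz)
            rw [← hcnt z] at this
            omega
        omega
      have hempty : (PySem.Dict.counter t).items.isEmpty = false := by
        rw [hitems, List.isEmpty_eq_false_iff]
        exact fun h => hofne (List.map_eq_nil_iff.mp h)
      unfold blkA
      rw [hempty, hmax]
      simp only [Bool.false_eq_true, if_false, gt_iff_lt]
      by_cases hm2 : 1 < m
      · rw [if_pos hm2]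
        have hW : ((PySem.Dict.counter t).items.filter (fun p => p.2 == m)).map (fun p => p.1)
            = (PySem.Set.ofList t).filter (fun k => (t.count k : Int) == m) := by
          rw [hitems, List.filter_map, List.map_map]
          simp [Function.comp_def]
        rw [hW]
        apply (List.perm_ext_iff_of_nodup i5 ((PySem.Set.nodup_ofList t).filter _)).mpr
        intro z
        rw [i4 z, List.mem_filter, PySem.Set.mem_ofList]
        constructor
        · rintro (⟨-, hz⟩ | ⟨hz, hc, -⟩)
          · cases hz
          · refine ⟨(hmems z).mp hz, ?_⟩
            rw [hcnt z] at hc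
            rw [hc, hr1]
            exact beq_self_eq_true m
        · rintro ⟨hz, hc⟩
          refine Or.inr ⟨(hmems z).mpr hz, ?_, by omega⟩
          rw [hcnt z, hr1]
          exact_mod_cast eq_of_beq hc
      · rw [if_neg hm2]
        have : r.2 = [] := by
          rw [List.eq_nil_iff_forall_not_mem]
          intro z hz
          rcases (i4 z).mp hz with ⟨-, hz'⟩ | ⟨-, -, hgt⟩
          · cases hz'
          · omega
        rw [this]

theorem foldl_body_flatMap {body : List String → Int → List String} {f : Int → List String}
    (h : ∀ a L, body a L = a ++ f L) (cs : List Int) : cs.foldl body [] = cs.flatMap f := by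
  have hb : body = fun a L => a ++ f L := funext fun a => funext fun L => h a L
  rw [hb]
  simpa using PySem.List.foldl_append_eq_flatMap f cs []

-- B's inner fold over the pre-sorted orders is A's inner fold
theorem combos_eq (orders : List String) (L : Int) :
    (orders.map (fun order => String.ofList (PySem.List.sorted order.toList (fun c => c) false))).foldl
      (fun combos s =>
        if L ≤ (s.toList.length : Int) then
          combos ++ (PySem.List.combinations s.toList L.toNat).map (fun c => String.ofList c)
        else combos) []
    = tmpF orders L := by
  rw [List.foldl_map]
  unfold tmpF
  congr 1
  funext a order
  simp [String.toList_ofList]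

theorem solution_eq_alt (orders : List String) (course : List Int) :
    solution orders course = solution_alt orders course := by
  have hsolA : solution orders course
      = PySem.List.sorted (course.flatMap (fun L => blkA (tmpF orders L))) (fun x => x) false := by
    show PySem.List.sorted (course.foldl (fun answer course_length =>
      if (PySem.Dict.counter (tmpF orders course_length)).items.isEmpty then answer
      else match PySem.List.max? (PySem.Dict.counter (tmpF orders course_length)).values (fun v => v) with
      | none => answer
      | some max_count =>
        if max_count > 1 then
          (PySem.Dict.counter (tmpF orders course_length)).items.foldl (fun answer p =>
            if p.2 == max_count then answer ++ [p.1] else answer) answer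
        else answer) []) (fun x => x) false = _
    rw [foldl_body_flatMap (fun a L => bodyA_eq (tmpF orders L) a) course]
  have hsolB : solution_alt orders course
      = PySem.List.sorted (course.flatMap (fun L =>
          (runScan (PySem.List.sorted (tmpF orders L) (fun x => x) false) 1 []).2)) (fun x => x) false := by
    show PySem.List.sorted (course.foldl (fun answer L =>
        answer ++ (runScan (PySem.List.sorted
          ((orders.map (fun order => String.ofList (PySem.List.sorted order.toList (fun c => c) false))).foldl
            (fun combos s =>
              if L ≤ (s.toList.length : Int) then
                combos ++ (PySem.List.combinations s.toList L.toNat).map (fun c => String.ofList c)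
              else combos) []) (fun x => x) false) 1 []).2) []) (fun x => x) false = _
    rw [foldl_body_flatMap (fun a L => by rw [combos_eq]) course]
  rw [hsolA, hsolB, PySem.List.sorted_id_eq_sorted_id_iff_perm]
  exact flatMap_perm course _ _ (fun L _ => (block_perm (tmpF orders L)).symm)

-- ===== VERDICT (by name: the statement is the Claim_ definition above) =====
theorem solution_spec : Claim_equal_solution := by
  intro orders course _ _
  unfold Spec_solution
  exact solution_eq_alt orders course
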